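-- pv_equiv track=rewrite | github.com/dsundby10/CoinbaseTradingTools | CreateOrders.py | calculateBaseMinSizeIncrementals
-- ===== SOURCE A (Python) =====
-- def calculateBaseMinSizeIncrementals(baseMinSize):
--     count = 0
--     size = 0
--     for x in baseMinSize:
--         if x == "1":
--             size = count - 1
--         count += 1
--     return size
-- ===== SOURCE B (Python) =====
-- def calculateBaseMinSizeIncrementals(baseMinSize):
--     for i in range(len(baseMinSize) - 1, -1, -1):
--         if baseMinSize[i] == "1":
--             return i - 1
--     return 0
-- ===== Notes on version B (the rewrite author's own statement) =====
-- stated objective: simpler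
-- what changed: Replaces the full forward pass that keeps a counter and overwrites size with a reverse scan that returns i-1 at the first '1' seen from the end (early exit), defaulting to 0.
import Mathlib
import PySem

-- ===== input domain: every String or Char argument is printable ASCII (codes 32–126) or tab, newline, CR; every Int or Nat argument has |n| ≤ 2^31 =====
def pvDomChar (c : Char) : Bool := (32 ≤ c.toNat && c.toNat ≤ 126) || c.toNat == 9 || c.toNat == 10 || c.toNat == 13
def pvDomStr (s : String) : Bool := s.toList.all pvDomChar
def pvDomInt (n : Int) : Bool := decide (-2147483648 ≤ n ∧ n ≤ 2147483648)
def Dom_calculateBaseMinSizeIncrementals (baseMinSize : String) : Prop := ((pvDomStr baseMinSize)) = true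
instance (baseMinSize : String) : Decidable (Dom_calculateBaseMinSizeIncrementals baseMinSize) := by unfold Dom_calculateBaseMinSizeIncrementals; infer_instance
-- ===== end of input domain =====

-- B replaces A's forward counter-and-overwrite pass by a reverse scan with early exit (simpler: no counter state).

-- ===== PORT A =====
-- forward fold carrying (count, size); size := count - 1 at each '1', count increments each step
def calculateBaseMinSizeIncrementals (baseMinSize : String) : Int :=
  (baseMinSize.toList.foldl
    (fun (st : Int × Int) x => (st.1 + 1, if x = '1' then st.1 - 1 else st.2)) (0, 0)).2

-- ===== PORT B =====
-- reverse scan: walk the reversed character list with the current index i, return i-1 at the first '1'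
def pvAltScan : List Char → Int → Int
  | [], _ => 0
  | c :: rest, i => if c = '1' then i - 1 else pvAltScan rest (i - 1)

def calculateBaseMinSizeIncrementals_alt (baseMinSize : String) : Int :=
  pvAltScan baseMinSize.toList.reverse ((baseMinSize.toList.length : Int) - 1)

-- ===== PRECONDITION & SPEC =====
def Spec_calculateBaseMinSizeIncrementals (baseMinSize : String) (out : Int) : Prop := out = calculateBaseMinSizeIncrementals_alt baseMinSize
instance (baseMinSize : String) (out : Int) : Decidable (Spec_calculateBaseMinSizeIncrementals baseMinSize out) := by unfold Spec_calculateBaseMinSizeIncrementals; infer_instance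

-- ===== CLAIM (what is proved, stated in full; the proofs are below) =====
def Claim_equal_calculateBaseMinSizeIncrementals : Prop := ∀ (baseMinSize : String), Dom_calculateBaseMinSizeIncrementals baseMinSize → Spec_calculateBaseMinSizeIncrementals baseMinSize (calculateBaseMinSizeIncrementals baseMinSize)

-- ===== LEMMAS AND PROOFS =====

def pvF : Int × Int → Char → Int × Int :=
  fun st x => (st.1 + 1, if x = '1' then st.1 - 1 else st.2)

theorem pvF_fst (l : List Char) (c sz : Int) :
    (List.foldl pvF (c, sz) l).1 = c + l.length := by
  induction l generalizing c sz with
  | nil => simp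
  | cons x xs ih => simp [List.foldl, pvF, ih]; ring

theorem pvMain (l : List Char) (c sz : Int) :
    (List.foldl pvF (c, sz) l).2 =
      if '1' ∈ l then pvAltScan l.reverse (c + l.length - 1) else sz := by
  induction l using List.reverseRecOn generalizing c sz with
  | nil => simp
  | append_singleton l' x ih =>
    rw [List.foldl_append]
    have hidx : c + ((l' ++ [x]).length : Int) - 1 = c + (l'.length : Int) := by
      simp [List.length_append]; ring
    rw [hidx]
    simp only [List.reverse_append, List.reverse_singleton, List.singleton_append, pvAltScan]
    by_cases hx : x = '1'
    · subst hx
      simp [pvF, pvF_fst l' c sz]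
    · have hmem : ('1' ∈ l' ++ [x]) ↔ ('1' ∈ l') := by
        simp [List.mem_append]
        intro h
        exact absurd h.symm hx
      simp only [pvF, List.foldl]
      rw [if_neg hx, if_neg (fun h : x = '1' => hx h), ih c sz]
      by_cases h1 : '1' ∈ l'
      · rw [if_pos h1, if_pos (hmem.mpr h1)]
      · rw [if_neg h1, if_neg (fun h => h1 (hmem.mp h))]

-- ===== VERDICT (by name: the statement is the Claim_ definition above) =====
theorem pvAltScan_no_one (l : List Char) (i : Int) (h : '1' ∉ l) : pvAltScan l i = 0 := by
  induction l generalizing i with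
  | nil => rfl
  | cons c rest ih =>
    have hc : c ≠ '1' := fun he => h (by simp [he])
    have hr : '1' ∉ rest := fun hm => h (List.mem_cons_of_mem _ hm)
    rw [pvAltScan, if_neg hc]
    exact ih _ hr

theorem calculateBaseMinSizeIncrementals_spec : Claim_equal_calculateBaseMinSizeIncrementals := by
  intro s _
  unfold Spec_calculateBaseMinSizeIncrementals calculateBaseMinSizeIncrementals calculateBaseMinSizeIncrementals_alt
  have h : (List.foldl pvF ((0 : Int), (0 : Int)) s.toList).2 =
      if '1' ∈ s.toList then pvAltScan s.toList.reverse ((0 : Int) + s.toList.length - 1) else 0 :=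
    pvMain s.toList 0 0
  have hF : (fun (st : Int × Int) x => (st.1 + 1, if x = '1' then st.1 - 1 else st.2)) = pvF := rfl
  rw [hF, h]
  by_cases h1 : '1' ∈ s.toList
  · rw [if_pos h1]; ring_nf
  · rw [if_neg h1, pvAltScan_no_one _ _ (by simpa using h1)]
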